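-- pv_equiv track=rewrite | github.com/etvan13/Deep_Terminal | baseTerminal_class.py | strCoord_conv
-- ===== SOURCE A (Python) =====
-- def strCoord_conv(number):
--     number %= (60 ** 6)  # Modulo to get the value within the current universe
--
--     digits = []
--     while number > 0:
--         digits.append(number % 60)
--         number //= 60
--
--     while len(digits) < 6:
--         digits.append(0)
--
--     return ' '.join(str(d) for d in digits)
-- ===== SOURCE B (Python) =====
-- def strCoord_conv(number):
--     # Recursive descent: build the six-digit base-60 string directly in one pass,
--     # concatenating separators as we go; fixed depth 6, no digit list, no padding step.
--     def go(n, k):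
--         if k == 1:
--             return str(n % 60)
--         return str(n % 60) + ' ' + go(n // 60, k - 1)
--     return go(number % 60 ** 6, 6)
-- ===== Notes on version B (the rewrite author's own statement) =====
-- stated objective: simpler
-- what changed: Replaces A's two staged passes (a mutating while-loop collecting a digit list, then a zero-padding loop, then str/join over the list) with a single fixed-depth recursive function that builds the output string directly, emitting each digit and its separator as it descends; no list, no padding, no join.
import Mathlib
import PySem

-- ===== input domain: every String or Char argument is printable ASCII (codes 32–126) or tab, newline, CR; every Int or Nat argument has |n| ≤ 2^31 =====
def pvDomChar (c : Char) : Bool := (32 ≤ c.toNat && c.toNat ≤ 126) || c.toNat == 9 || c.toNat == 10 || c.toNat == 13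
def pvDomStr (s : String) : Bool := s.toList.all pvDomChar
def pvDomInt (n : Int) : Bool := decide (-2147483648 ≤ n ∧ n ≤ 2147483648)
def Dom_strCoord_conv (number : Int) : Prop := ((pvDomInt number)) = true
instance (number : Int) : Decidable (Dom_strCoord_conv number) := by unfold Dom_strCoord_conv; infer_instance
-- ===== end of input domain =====

-- B replaces A's staged passes (digit-collection loop, zero-padding loop, join) by one
-- fixed-depth recursion that emits each digit and separator directly; objective: simpler.

-- ===== PORT A =====
-- while number > 0: digits.append(number % 60); number //= 60
def pvDigitLoop (number : Int) (digits : List Int) : List Int :=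
  if h : number > 0 then
    pvDigitLoop (PySem.Int.floordiv number 60) (digits ++ [PySem.Int.mod number 60])
  else digits
termination_by number.toNat
decreasing_by
  rw [PySem.Int.floordiv_eq_ediv_of_pos (by norm_num)]
  have h1 := Int.ediv_le_self 60 h.le
  have h2 : number / 60 ≠ number := by
    intro he
    have := Int.ediv_lt_iff_lt_mul (a := number) (b := number) (c := 60) (by norm_num)
    omega
  omega

-- while len(digits) < 6: digits.append(0)
def pvPadLoop (digits : List Int) : List Int :=
  if digits.length < 6 then pvPadLoop (digits ++ [0]) else digits
termination_by 6 - digits.length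
decreasing_by simp; omega

def strCoord_conv (number : Int) : String :=
  let n := PySem.Int.mod number (60 ^ 6)
  PySem.Str.join " " ((pvPadLoop (pvDigitLoop n [])).map PySem.Int.toStr)

-- ===== PORT B =====
-- def go(n, k): if k == 1: return str(n % 60); return str(n % 60) + ' ' + go(n // 60, k - 1)
-- (string concatenation is ported on the List Char side, as PySem strings are)
def pvGo : Int → Nat → List Char
  | n, 1 => (PySem.Int.toStr (PySem.Int.mod n 60)).toList
  | n, (k+2) =>
      (PySem.Int.toStr (PySem.Int.mod n 60)).toList
        ++ ' ' :: pvGo (PySem.Int.floordiv n 60) (k+1)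
  | _, 0 => []  -- unreachable: the entry call uses k = 6

def strCoord_conv_alt (number : Int) : String :=
  String.ofList (pvGo (PySem.Int.mod number (60 ^ 6)) 6)

-- ===== PRECONDITION & SPEC =====
def Spec_strCoord_conv (number : Int) (out : String) : Prop := out = strCoord_conv_alt number
instance (number : Int) (out : String) : Decidable (Spec_strCoord_conv number out) := by unfold Spec_strCoord_conv; infer_instance

-- ===== CLAIM (what is proved, stated in full; the proofs are below) =====
def Claim_equal_strCoord_conv : Prop := ∀ (number : Int), Dom_strCoord_conv number → Spec_strCoord_conv number (strCoord_conv number)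

-- ===== LEMMAS AND PROOFS =====

-- the accumulator of A's digit loop commutes out
theorem pvDigitLoop_acc (N : Nat) : ∀ n : Int, n.toNat ≤ N → ∀ ds : List Int,
    pvDigitLoop n ds = ds ++ pvDigitLoop n [] := by
  induction N with
  | zero =>
    intro n hn ds
    have h : ¬ n > 0 := by omega
    rw [pvDigitLoop]
    simp [pvDigitLoop, h]
  | succ N ih =>
    intro n hn ds
    by_cases h : n > 0
    · have hb : (PySem.Int.floordiv n 60).toNat ≤ N := by
        rw [PySem.Int.floordiv_eq_ediv_of_pos (by norm_num)]
        have h1 := Int.ediv_le_self 60 h.le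
        have h2 : n / 60 ≠ n := by
          intro he
          have := Int.ediv_lt_iff_lt_mul (a := n) (b := n) (c := 60) (by norm_num)
          omega
        omega
      rw [pvDigitLoop]; conv_rhs => rw [pvDigitLoop]
      simp only [h, dif_pos, List.nil_append]
      rw [ih _ hb (ds ++ [PySem.Int.mod n 60]), ih _ hb [PySem.Int.mod n 60]]
      simp
    · rw [pvDigitLoop]; conv_rhs => rw [pvDigitLoop]
      simp [h]

-- A's extracted digits, padded with zeros to length k, are the k positional digits
theorem pvDigits_eq (k : Nat) : ∀ n : Int, 0 ≤ n → n < 60 ^ k →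
    pvDigitLoop n [] ++ List.replicate (k - (pvDigitLoop n []).length) 0
      = (List.range k).map (fun i => n / 60 ^ i % 60) := by
  induction k with
  | zero =>
    intro n h0 h1
    have hn : n = 0 := by omega
    subst hn
    rw [pvDigitLoop]; simp
  | succ k ih =>
    intro n h0 h1
    by_cases h : n > 0
    · have hu : pvDigitLoop n [] = n % 60 :: pvDigitLoop (n / 60) [] := by
        rw [pvDigitLoop]
        simp only [h, dif_pos, List.nil_append]
        rw [pvDigitLoop_acc _ _ le_rfl,
            PySem.Int.floordiv_eq_ediv_of_pos (by norm_num),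
            PySem.Int.mod_eq_emod_of_pos (by norm_num)]
        simp
      have hq0 : 0 ≤ n / 60 := Int.ediv_nonneg h0 (by norm_num)
      have hq1 : n / 60 < 60 ^ k := by
        rw [Int.ediv_lt_iff_lt_mul (by norm_num)]
        calc n < 60 ^ (k + 1) := h1
          _ = 60 ^ k * 60 := by ring
      have hIH := ih (n / 60) hq0 hq1
      rw [hu, List.range_succ_eq_map, List.map_cons, List.map_map]
      simp only [List.cons_append, List.length_cons]
      congr 1
      · norm_num
      · have hk : k + 1 - ((pvDigitLoop (n / 60) []).length + 1)
            = k - (pvDigitLoop (n / 60) []).length := by omega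
        rw [hk, hIH]
        apply List.map_congr_left
        intro i _
        simp only [Function.comp_apply, Nat.succ_eq_add_one]
        rw [pow_succ', ← Int.ediv_ediv_of_nonneg (show (0:Int) ≤ 60 by norm_num)]
    · have hn : n = 0 := by omega
      subst hn
      rw [pvDigitLoop]
      simp

-- the padding loop appends exactly 6 - length zeros
theorem pvPadLoop_eq (m : Nat) : ∀ ds : List Int, 6 - ds.length = m →
    pvPadLoop ds = ds ++ List.replicate m 0 := by
  induction m with
  | zero =>
    intro ds h
    rw [pvPadLoop]
    have : ¬ ds.length < 6 := by omega
    simp [this]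
  | succ m ih =>
    intro ds h
    rw [pvPadLoop]
    have hl : ds.length < 6 := by omega
    simp only [hl, if_pos]
    rw [ih (ds ++ [0]) (by simp; omega)]
    simp [List.replicate_succ]

-- join with a separator, unfolded one element off a nonempty tail
theorem pvJoin_cons (a : List Char) (l : List (List Char)) (h : l ≠ []) :
    PySem.Chars.join [' '] (a :: l) = a ++ ' ' :: PySem.Chars.join [' '] l := by
  cases l with
  | nil => exact absurd rfl h
  | cons b t => rw [PySem.Chars.join_cons_cons]; simp

-- B's recursion computes the joined k+1 positional digits
theorem pvGo_eq (k : Nat) : ∀ n : Int,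
    pvGo n (k + 1)
      = PySem.Chars.join [' ']
          (((List.range (k + 1)).map (fun i => n / 60 ^ i % 60)).map
            (fun d => (PySem.Int.toStr d).toList)) := by
  induction k with
  | zero =>
    intro n
    show (PySem.Int.toStr (PySem.Int.mod n 60)).toList = _
    rw [PySem.Int.mod_eq_emod_of_pos (by norm_num)]
    simp [PySem.Chars.join_singleton]
  | succ k ih =>
    intro n
    show (PySem.Int.toStr (PySem.Int.mod n 60)).toList
        ++ ' ' :: pvGo (PySem.Int.floordiv n 60) (k + 1) = _
    rw [PySem.Int.mod_eq_emod_of_pos (by norm_num),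
        PySem.Int.floordiv_eq_ediv_of_pos (by norm_num), ih]
    have hr : List.range (k + 1 + 1) = 0 :: (List.range (k + 1)).map Nat.succ :=
      List.range_succ_eq_map
    rw [hr, List.map_cons, List.map_cons, List.map_map, List.map_map]
    rw [pvJoin_cons _ _ (by simp)]
    congr 2
    · norm_num
    · rw [List.map_map]
      congr 1
      apply List.map_congr_left
      intro i _
      simp only [Function.comp_apply, Nat.succ_eq_add_one]
      rw [pow_succ', ← Int.ediv_ediv_of_nonneg (show (0:Int) ≤ 60 by norm_num)]

-- ===== VERDICT (by name: the statement is the Claim_ definition above) =====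
theorem strCoord_conv_spec : Claim_equal_strCoord_conv := by
  intro number _
  unfold Spec_strCoord_conv strCoord_conv strCoord_conv_alt
  set n := PySem.Int.mod number (60 ^ 6) with hn
  have h0 : 0 ≤ n := PySem.Int.mod_nonneg _ (by norm_num)
  have h1 : n < 60 ^ 6 := PySem.Int.mod_lt _ (by norm_num)
  have hpad : pvPadLoop (pvDigitLoop n []) =
      (List.range 6).map (fun i => n / 60 ^ i % 60) := by
    rw [pvPadLoop_eq (6 - (pvDigitLoop n []).length) _ rfl, pvDigits_eq 6 n h0 h1]
  have key : (PySem.Str.join " "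
      ((pvPadLoop (pvDigitLoop n [])).map PySem.Int.toStr)).toList = pvGo n 6 := by
    rw [PySem.Str.toList_join, hpad, pvGo_eq 5 n]
    simp [List.map_map, Function.comp_def, PySem.Int.toList_toStr]
  rw [← key, String.ofList_toList]
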